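-- pv_equiv track=rewrite | github.com/Emphasize5599/Clash-of-Clans-Tag-Sequencer | range_sequencer.py | base10_to_base256
-- ===== SOURCE A (Python) =====
-- def base10_to_base256(number):
--     base256_values = [0] * 8  # Initialize an array of 8 zeros
--     index = 7  # Start from the rightmost (least significant) byte
--     while number > 0 and index >= 0:
--         remainder = number % 256
--         base256_values[index] = remainder
--         number = number // 256
--         index -= 1
--     return ', '.join(map(str, base256_values))  # Convert the list to a comma-separated string
-- ===== SOURCE B (Python) =====
-- def base10_to_base256(number):
--     # Closed-form: clamp non-positive to 0, truncate to low 8 bytes, then big-endian to_bytes.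
--     n = (number if number > 0 else 0) % (256 ** 8)
--     return ', '.join(map(str, n.to_bytes(8, 'big')))
-- ===== Notes on version B (the rewrite author's own statement) =====
-- stated objective: idiomatic
-- what changed: Replaces the per-byte remainder/division while-loop over a mutable 8-slot list with a closed-form conversion: clamp non-positive input to 0, reduce modulo 256**8, and emit the big-endian bytes via int.to_bytes.
import Mathlib
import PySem

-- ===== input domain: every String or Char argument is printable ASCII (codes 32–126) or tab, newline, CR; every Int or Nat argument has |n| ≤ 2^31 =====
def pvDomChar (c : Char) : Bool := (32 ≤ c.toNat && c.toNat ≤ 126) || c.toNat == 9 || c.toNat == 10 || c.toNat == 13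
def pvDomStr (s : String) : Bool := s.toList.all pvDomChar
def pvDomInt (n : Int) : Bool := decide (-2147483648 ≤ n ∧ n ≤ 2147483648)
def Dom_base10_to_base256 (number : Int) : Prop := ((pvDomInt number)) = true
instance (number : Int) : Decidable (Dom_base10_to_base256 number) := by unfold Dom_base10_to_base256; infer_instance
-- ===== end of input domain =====

-- B replaces A's per-byte remainder loop with a closed-form clamp + modulo + big-endian byte extraction (objective: idiomatic).

-- ===== PORT A =====
-- the while loop: writes number % 256 at position index, then number //= 256, index -= 1
def pvALoop (number : Int) (index : Int) (vals : List Int) : List Int :=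
  if number > 0 ∧ index ≥ 0 then
    pvALoop (PySem.Int.floordiv number 256) (index - 1)
      (vals.set index.toNat (PySem.Int.mod number 256))
  else vals
termination_by (index + 1).toNat
decreasing_by omega

def base10_to_base256 (number : Int) : String :=
  PySem.Str.join ", " ((pvALoop number 7 [0, 0, 0, 0, 0, 0, 0, 0]).map PySem.Int.toStr)

-- ===== PORT B =====
-- port of Source B: n = (number if number > 0 else 0) % 256**8; ', '.join(map(str, n.to_bytes(8,'big'))).
-- n.to_bytes(8,'big') is ported explicitly as the 8 big-endian base-256 digits (exact for 0 ≤ n < 256^8).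
def base10_to_base256_alt (number : Int) : String :=
  let n := PySem.Int.mod (if number > 0 then number else 0) (256 ^ 8)
  let bytes : List Int :=
    [ PySem.Int.mod (PySem.Int.floordiv n (256 ^ 7)) 256
    , PySem.Int.mod (PySem.Int.floordiv n (256 ^ 6)) 256
    , PySem.Int.mod (PySem.Int.floordiv n (256 ^ 5)) 256
    , PySem.Int.mod (PySem.Int.floordiv n (256 ^ 4)) 256
    , PySem.Int.mod (PySem.Int.floordiv n (256 ^ 3)) 256
    , PySem.Int.mod (PySem.Int.floordiv n (256 ^ 2)) 256
    , PySem.Int.mod (PySem.Int.floordiv n (256 ^ 1)) 256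
    , PySem.Int.mod n 256 ]
  PySem.Str.join ", " (bytes.map PySem.Int.toStr)

-- ===== PRECONDITION & SPEC =====
def Spec_base10_to_base256 (number : Int) (out : String) : Prop := out = base10_to_base256_alt number
instance (number : Int) (out : String) : Decidable (Spec_base10_to_base256 number out) := by unfold Spec_base10_to_base256; infer_instance

-- ===== CLAIM (what is proved, stated in full; the proofs are below) =====
def Claim_equal_base10_to_base256 : Prop := ∀ (number : Int), Dom_base10_to_base256 number → Spec_base10_to_base256 number (base10_to_base256 number)

-- ===== LEMMAS AND PROOFS =====

lemma pv_digits_eq (number : Int) (h1 : -2147483648 ≤ number) (h2 : number ≤ 2147483648) :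
    pvALoop number 7 [0, 0, 0, 0, 0, 0, 0, 0] =
      [ PySem.Int.mod (PySem.Int.floordiv (PySem.Int.mod (if number > 0 then number else 0) (256 ^ 8)) (256 ^ 7)) 256
      , PySem.Int.mod (PySem.Int.floordiv (PySem.Int.mod (if number > 0 then number else 0) (256 ^ 8)) (256 ^ 6)) 256
      , PySem.Int.mod (PySem.Int.floordiv (PySem.Int.mod (if number > 0 then number else 0) (256 ^ 8)) (256 ^ 5)) 256
      , PySem.Int.mod (PySem.Int.floordiv (PySem.Int.mod (if number > 0 then number else 0) (256 ^ 8)) (256 ^ 4)) 256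
      , PySem.Int.mod (PySem.Int.floordiv (PySem.Int.mod (if number > 0 then number else 0) (256 ^ 8)) (256 ^ 3)) 256
      , PySem.Int.mod (PySem.Int.floordiv (PySem.Int.mod (if number > 0 then number else 0) (256 ^ 8)) (256 ^ 2)) 256
      , PySem.Int.mod (PySem.Int.floordiv (PySem.Int.mod (if number > 0 then number else 0) (256 ^ 8)) (256 ^ 1)) 256
      , PySem.Int.mod (PySem.Int.mod (if number > 0 then number else 0) (256 ^ 8)) 256 ] := by
  rw [pvALoop, pvALoop, pvALoop, pvALoop, pvALoop]
  simp only [PySem.Int.floordiv_eq_ediv_of_pos (show (0:Int) < 256 by norm_num),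
    PySem.Int.mod_eq_emod_of_pos (show (0:Int) < 256 by norm_num),
    PySem.Int.floordiv_eq_ediv_of_pos (show (0:Int) < 256 ^ 7 by norm_num),
    PySem.Int.floordiv_eq_ediv_of_pos (show (0:Int) < 256 ^ 6 by norm_num),
    PySem.Int.floordiv_eq_ediv_of_pos (show (0:Int) < 256 ^ 5 by norm_num),
    PySem.Int.floordiv_eq_ediv_of_pos (show (0:Int) < 256 ^ 4 by norm_num),
    PySem.Int.floordiv_eq_ediv_of_pos (show (0:Int) < 256 ^ 3 by norm_num),
    PySem.Int.floordiv_eq_ediv_of_pos (show (0:Int) < 256 ^ 2 by norm_num),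
    PySem.Int.floordiv_eq_ediv_of_pos (show (0:Int) < 256 ^ 1 by norm_num),
    PySem.Int.mod_eq_emod_of_pos (show (0:Int) < 256 ^ 8 by norm_num)]
  split_ifs <;>
    simp_all [List.set, List.cons.injEq] <;> omega

-- ===== VERDICT (by name: the statement is the Claim_ definition above) =====
theorem base10_to_base256_spec : Claim_equal_base10_to_base256 := by
  intro number hdom
  have h : -2147483648 ≤ number ∧ number ≤ 2147483648 := by
    simpa [Dom_base10_to_base256, pvDomInt] using hdom
  unfold Spec_base10_to_base256 base10_to_base256 base10_to_base256_alt
  rw [pv_digits_eq number h.1 h.2]
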